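-- pv_equiv track=rewrite | github.com/edurange/edurange3 | scenarios/global_scripts/analyze2/analyzer_methods.py | get_ttylog_lines_to_decode
-- ===== SOURCE A (Python) =====
-- def get_ttylog_lines_to_decode(ttylog_lines_read_next, ttylog_lines_from_file, known_prompts, current_root_prompt):
--     # Return two lists
--     # The first list contains the ttylog lines that should be read in next iteration of infinite loop.
--     # The second list contain the ttylog lines that should be docded in current iteration of infinite loop.
--
--     if len(ttylog_lines_from_file) == 0:
--         return [], ttylog_lines_read_next
--
--     elif len(ttylog_lines_from_file) >= 1:
--         if len(ttylog_lines_read_next) > 0: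
--             ttylog_lines_read_next[-1] += ttylog_lines_from_file[0]
--             if len(ttylog_lines_from_file) > 1:
--                 ttylog_lines_read_next.extend(ttylog_lines_from_file[1:])
--         else:
--             ttylog_lines_read_next.extend(ttylog_lines_from_file)
--
--     index_ttylog_lines_file = None
--     line_prompt_end_index = -1
--     line_to_append = ''
--     current_root_prompt = current_root_prompt.casefold()
--
--     # When we get two user prompts in ttylog_lines_read_next, we add all the lines from first user prompt to second user prompt to ttylog_lines_to_decode.
--     # Second user prompt line is not inclusive
--     no_of_prompts_in_ttylog_read_next = 0
--
--     # Make a Reverse copy of the ttylog_lines_from_file list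
--     ttylog_next_reverse = ttylog_lines_read_next[::-1]
--     for count, line in enumerate(ttylog_next_reverse):
--         if r'END tty_sid' in line:
--             ttylog_lines_to_decode = ttylog_lines_read_next[::]
--             ttylog_lines_read_next = []
--             return ttylog_lines_to_decode, ttylog_lines_read_next
--         elif any(p.casefold() in line.casefold() for p in known_prompts):
--             no_of_prompts_in_ttylog_read_next += 1
--             # Break the loop of no_of_prompts >= 2
--             if no_of_prompts_in_ttylog_read_next >= 2:
--                 break
--
--             # Get index of this line in ttylog_lines_file
--             index_ttylog_lines_file = len(ttylog_lines_read_next) - 1 - count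
--
--             # Find the last user prompt. Get data starting from 0th index to ending of last user prompt from the line
--             #for p in known_prompts:
--             #    if (line.casefold().rfind(p.casefold()) > -1):
--             #        line_prompt_end_index = line.casefold().rfind(p.casefold())
--             #        line_prompt_end_index = line_prompt_end_index + len(p.casefold())
--             #        break
--             #line_to_append = line[:line_prompt_end_index]
--
--     if index_ttylog_lines_file is not None and no_of_prompts_in_ttylog_read_next >= 2:
--
--         ttylog_lines_to_decode = ttylog_lines_read_next[:index_ttylog_lines_file]
--
--         # Add the line containing user/root prompt to ttylog_lines_to_decode so that the most recently executed command can be parsed.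
--         # The characters from 0th index till ending of last user prompt is included is contained in line_to_append
--         #if len(line_to_append) > 0:
--         #    ttylog_lines_to_decode.append(line_to_append)
--
--         ttylog_lines_read_next = ttylog_lines_read_next[index_ttylog_lines_file:]
--         return ttylog_lines_to_decode, ttylog_lines_read_next
--
--     else:
--         return [], ttylog_lines_read_next
-- ===== SOURCE B (Python) =====
-- def get_ttylog_lines_to_decode(ttylog_lines_read_next, ttylog_lines_from_file, known_prompts, current_root_prompt):
--     # Table-driven rewrite: build the list of prompt-line indices once, then branch.
--     # Performs the same in-place merge of ttylog_lines_read_next as the original.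
--     if not ttylog_lines_from_file:
--         return [], ttylog_lines_read_next
--     if ttylog_lines_read_next:
--         ttylog_lines_read_next[-1] += ttylog_lines_from_file[0]
--         ttylog_lines_read_next.extend(ttylog_lines_from_file[1:])
--     else:
--         ttylog_lines_read_next.extend(ttylog_lines_from_file)
--     prompts = [p.casefold() for p in known_prompts]
--     lower_lines = [line.casefold() for line in ttylog_lines_read_next]
--     prompt_idx = [i for i, lc in enumerate(lower_lines)
--                   if any(p in lc for p in prompts)]
--     scan_low = prompt_idx[-2] if len(prompt_idx) >= 2 else 0
--     if any('END tty_sid' in line for line in ttylog_lines_read_next[scan_low:]):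
--         return ttylog_lines_read_next[:], []
--     if len(prompt_idx) >= 2:
--         split = prompt_idx[-1]
--         return ttylog_lines_read_next[:split], ttylog_lines_read_next[split:]
--     return [], ttylog_lines_read_next
-- ===== Notes on version B (the rewrite author's own statement) =====
-- stated objective: simpler
-- what changed: Replaces A's reverse scan with an enumerate counter, prompt counter and early break by one forward pass that builds the list of prompt-line indices, then branches: END-marker containment is checked on the slice from the second-to-last prompt index, and the split point is the last prompt index.
import Mathlib
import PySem

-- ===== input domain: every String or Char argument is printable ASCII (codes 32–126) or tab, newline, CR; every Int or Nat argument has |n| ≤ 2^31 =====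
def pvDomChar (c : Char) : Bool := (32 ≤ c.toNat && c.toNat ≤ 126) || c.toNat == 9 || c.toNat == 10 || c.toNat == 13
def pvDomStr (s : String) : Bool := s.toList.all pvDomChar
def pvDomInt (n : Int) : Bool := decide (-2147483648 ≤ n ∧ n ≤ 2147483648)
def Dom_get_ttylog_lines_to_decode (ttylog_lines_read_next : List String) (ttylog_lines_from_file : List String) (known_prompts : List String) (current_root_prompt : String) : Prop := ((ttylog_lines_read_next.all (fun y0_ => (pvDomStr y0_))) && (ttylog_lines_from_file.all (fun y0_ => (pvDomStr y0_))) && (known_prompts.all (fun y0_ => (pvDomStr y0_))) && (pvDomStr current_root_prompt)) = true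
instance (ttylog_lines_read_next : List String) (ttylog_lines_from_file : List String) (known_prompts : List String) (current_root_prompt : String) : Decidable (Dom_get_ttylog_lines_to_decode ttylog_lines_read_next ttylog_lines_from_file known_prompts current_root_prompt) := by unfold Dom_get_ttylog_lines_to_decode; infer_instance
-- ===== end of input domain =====

-- B replaces A's reverse scan + prompt counter with a prompt-index table built in one forward pass
-- (objective: simpler). Return-value equivalence only: both Pythons mutate ttylog_lines_read_next
-- in place the same way; the proofs below are about the returned pair.

-- ===== PORT A =====
-- 'END tty_sid' in line
def pvIsEnd (line : String) : Bool := PySem.Str.isIn "END tty_sid" line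
-- any(p.casefold() in line.casefold() for p in known_prompts); casefold = lower, exact on the ASCII domain
def pvPromptHit (known_prompts : List String) (line : String) : Bool :=
  known_prompts.any (fun p => PySem.Str.isIn (PySem.Str.lower p) (PySem.Str.lower line))

-- A's 'for count, line in enumerate(ttylog_next_reverse)' loop; state = (count, no_of_prompts, index);
-- result: none = the 'END tty_sid' early return, some (index, no_of_prompts) = loop finished/broke.
def pvLoopA (known_prompts : List String) (len : Nat) :
    List String → Nat → Nat → Option Nat → Option (Option Nat × Nat)
  | [], _, noP, idx => some (idx, noP)
  | line :: rest, count, noP, idx =>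
    if pvIsEnd line then none
    else if pvPromptHit known_prompts line then
      if 2 ≤ noP + 1 then some (idx, noP + 1)
      else pvLoopA known_prompts len rest (count + 1) (noP + 1) (some (len - 1 - count))
    else pvLoopA known_prompts len rest (count + 1) noP idx

def get_ttylog_lines_to_decode (ttylog_lines_read_next : List String) (ttylog_lines_from_file : List String) (known_prompts : List String) (current_root_prompt : String) : List String × List String :=
  if ttylog_lines_from_file.length = 0 then ([], ttylog_lines_read_next)
  else
    -- the in-place merge: read_next[-1] += file[0]; extend(file[1:]) / extend(file)
    let rn1 := if ttylog_lines_read_next.length > 0 then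
        ttylog_lines_read_next.dropLast ++
          [ttylog_lines_read_next.getLastD "" ++ ttylog_lines_from_file.headD ""] ++
          (if ttylog_lines_from_file.length > 1 then ttylog_lines_from_file.tail else [])
      else ttylog_lines_read_next ++ ttylog_lines_from_file
    -- current_root_prompt = current_root_prompt.casefold()  (computed, never used)
    let _root := PySem.Str.lower current_root_prompt
    -- ttylog_next_reverse = rn1[::-1]; then the scan
    match pvLoopA known_prompts rn1.length rn1.reverse 0 0 none with
    | none => (rn1, [])   -- END branch: (copy of rn1, [])
    | some (idx, noP) =>
      match idx with
      | some i => if 2 ≤ noP then (rn1.take i, rn1.drop i) else ([], rn1)  -- rn1[:i], rn1[i:], 0 ≤ i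
      | none => ([], rn1)

-- ===== PORT B =====
def get_ttylog_lines_to_decode_alt (ttylog_lines_read_next : List String) (ttylog_lines_from_file : List String) (known_prompts : List String) (current_root_prompt : String) : List String × List String :=
  if ttylog_lines_from_file.isEmpty then ([], ttylog_lines_read_next)
  else
    let m := if ¬ ttylog_lines_read_next.isEmpty then
        ttylog_lines_read_next.dropLast ++
          [ttylog_lines_read_next.getLastD "" ++ ttylog_lines_from_file.headD ""] ++
          ttylog_lines_from_file.tail
      else ttylog_lines_read_next ++ ttylog_lines_from_file
    let prompts := known_prompts.map PySem.Str.lower    -- casefold = lower on the ASCII domain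
    -- lower_lines = [line.casefold() for line in m]; prompt_idx = [i for i, lc in
    -- enumerate(lower_lines) if any(p in lc for p in prompts)]
    let lowerLines := m.map PySem.Str.lower
    let pidx : List Int := ((PySem.List.enumerate lowerLines).filter
        (fun il => prompts.any (fun p => PySem.Str.isIn p il.2))).map Prod.fst
    -- scan_low = prompt_idx[-2] if len(prompt_idx) >= 2 else 0   (getD 0 unreachable: length ≥ 2)
    let scanLow : Int := if 2 ≤ pidx.length then (PySem.List.pyGet? pidx (-2)).getD 0 else 0
    if (PySem.List.slice m (some scanLow) none).any (fun line => PySem.Str.isIn "END tty_sid" line) then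
      (m, [])   -- m[:] copy, []
    else if 2 ≤ pidx.length then
      let split : Int := (PySem.List.pyGet? pidx (-1)).getD 0   -- getD 0 unreachable: length ≥ 2
      (PySem.List.slice m none (some split), PySem.List.slice m (some split) none)
    else ([], m)

-- ===== PRECONDITION & SPEC =====
def Spec_get_ttylog_lines_to_decode (ttylog_lines_read_next : List String) (ttylog_lines_from_file : List String) (known_prompts : List String) (current_root_prompt : String) (out : List String × List String) : Prop := out = get_ttylog_lines_to_decode_alt ttylog_lines_read_next ttylog_lines_from_file known_prompts current_root_prompt
instance (ttylog_lines_read_next : List String) (ttylog_lines_from_file : List String) (known_prompts : List String) (current_root_prompt : String) (out : List String × List String) : Decidable (Spec_get_ttylog_lines_to_decode ttylog_lines_read_next ttylog_lines_from_file known_prompts current_root_prompt out) := by unfold Spec_get_ttylog_lines_to_decode; infer_instance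

-- ===== CLAIM (what is proved, stated in full; the proofs are below) =====
def Claim_equal_get_ttylog_lines_to_decode : Prop := ∀ (ttylog_lines_read_next : List String) (ttylog_lines_from_file : List String) (known_prompts : List String) (current_root_prompt : String), Dom_get_ttylog_lines_to_decode ttylog_lines_read_next ttylog_lines_from_file known_prompts current_root_prompt → Spec_get_ttylog_lines_to_decode ttylog_lines_read_next ttylog_lines_from_file known_prompts current_root_prompt (get_ttylog_lines_to_decode ttylog_lines_read_next ttylog_lines_from_file known_prompts current_root_prompt)

-- ===== LEMMAS AND PROOFS =====

-- hit table: the (index, element) pairs of l whose element satisfies P, in order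
def pvHits {α : Type} (P : α → Bool) : List α → List (Nat × α)
  | [] => []
  | x :: xs =>
    let t := (pvHits P xs).map (fun p => (p.1 + 1, p.2))
    if P x then (0, x) :: t else t

theorem mem_pvHits_iff {α : Type} (P : α → Bool) (l : List α) (j : Nat) (x : α) :
    (j, x) ∈ pvHits P l ↔ l[j]? = some x ∧ P x = true := by
  induction l generalizing j x with
  | nil => simp [pvHits]
  | cons a as ih =>
    simp only [pvHits]
    by_cases hP : P a
    · simp only [hP, if_pos, List.mem_cons, List.mem_map, Prod.mk.injEq]
      constructor
      · rintro (⟨h1, h2⟩ | ⟨p, hp, h1, h2⟩)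
        · subst h1 h2; simp [hP]
        · subst h2; obtain ⟨hg, hPp⟩ := (ih p.1 p.2).mp (by simpa using hp)
          subst h1; simpa [hg] using hPp
      · rintro ⟨hg, hx⟩
        cases j with
        | zero => left; simp at hg; exact ⟨rfl, hg.symm⟩
        | succ k =>
          right; exact ⟨(k, x), (ih k x).mpr ⟨by simpa using hg, hx⟩, rfl, rfl⟩
    · simp only [hP, if_neg, Bool.false_eq_true, not_false_iff, List.mem_map, Prod.mk.injEq]
      constructor
      · rintro ⟨p, hp, h1, h2⟩
        subst h2; obtain ⟨hg, hPp⟩ := (ih p.1 p.2).mp (by simpa using hp)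
        subst h1; simpa [hg] using hPp
      · rintro ⟨hg, hx⟩
        cases j with
        | zero => simp at hg; subst hg; simp [hx] at hP
        | succ k => exact ⟨(k, x), (ih k x).mpr ⟨by simpa using hg, hx⟩, rfl, rfl⟩

theorem pvHits_pairwise {α : Type} (P : α → Bool) (l : List α) :
    (pvHits P l).Pairwise (fun p q => p.1 < q.1) := by
  induction l with
  | nil => simp [pvHits]
  | cons a as ih =>
    simp only [pvHits]
    have hmap : ((pvHits P as).map (fun p => (p.1 + 1, p.2))).Pairwise (fun p q => p.1 < q.1) := by
      rw [List.pairwise_map]; exact ih.imp (by intro p q h; simpa using h)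
    by_cases hP : P a
    · simp only [hP, if_pos]
      refine List.Pairwise.cons ?_ hmap
      intro q hq; simp only [List.mem_map] at hq; obtain ⟨p, _, rfl⟩ := hq; simp
    · simpa [hP] using hmap

theorem pvHits_sublist {α : Type} (P Q : α → Bool) (l : List α)
    (h : ∀ x, P x = true → Q x = true) : (pvHits P l).Sublist (pvHits Q l) := by
  induction l with
  | nil => simp [pvHits]
  | cons a as ih =>
    simp only [pvHits]
    have hm : ((pvHits P as).map (fun p => (p.1 + 1, p.2))).Sublist
        ((pvHits Q as).map (fun p => (p.1 + 1, p.2))) := ih.map _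
    by_cases hP : P a
    · simp [hP, h a hP, hm.cons₂]
    · by_cases hQ : Q a
      · simp only [hP, hQ, if_pos, Bool.false_eq_true, if_neg, not_false_iff]
        exact hm.cons _
      · simpa [hP, hQ] using hm

theorem any_take_iff_pvHits {α : Type} (P : α → Bool) (l : List α) (w : Nat) :
    (l.take w).any P = true ↔ ∃ p ∈ pvHits P l, p.1 < w := by
  induction l generalizing w with
  | nil => simp [pvHits]
  | cons a as ih =>
    cases w with
    | zero => simp
    | succ v =>
      simp only [List.take_succ_cons, List.any_cons, Bool.or_eq_true, ih, pvHits]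
      by_cases hP : P a
      · simp only [hP, if_pos, true_or, List.mem_cons, List.mem_map]
        constructor
        · intro _; exact ⟨(0, a), Or.inl rfl, Nat.succ_pos v⟩
        · intro _; trivial
      · simp only [hP, if_neg, Bool.false_eq_true, not_false_iff, false_or, List.mem_map]
        constructor
        · rintro ⟨p, hp, hw⟩; exact ⟨(p.1 + 1, p.2), ⟨p, hp, rfl⟩, by omega⟩
        · rintro ⟨q, ⟨p, hp, rfl⟩, hw⟩; exact ⟨p, hp, by simpa using hw⟩

theorem pvHits_append {α : Type} (P : α → Bool) (u v : List α) :
    pvHits P (u ++ v) = pvHits P u ++ (pvHits P v).map (fun p => (p.1 + u.length, p.2)) := by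
  induction u with
  | nil => simp [pvHits]
  | cons a as ih =>
    simp only [List.cons_append, pvHits, ih, List.map_append, List.map_map]
    by_cases hP : P a <;> simp [hP, Function.comp] <;> omega

theorem pvHits_lt_length {α : Type} (P : α → Bool) (l : List α) (p : Nat × α)
    (hp : p ∈ pvHits P l) : p.1 < l.length := by
  obtain ⟨j, x⟩ := p
  have := (mem_pvHits_iff P l j x).mp hp
  exact List.getElem?_eq_some_iff.mp this.1 |>.1

theorem pvHits_reverse {α : Type} (P : α → Bool) (l : List α) :
    pvHits P l.reverse = ((pvHits P l).map (fun p => (l.length - 1 - p.1, p.2))).reverse := by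
  induction l with
  | nil => simp [pvHits]
  | cons a as ih =>
    rw [List.reverse_cons, pvHits_append, ih]
    simp only [pvHits]
    by_cases hP : P a
    · simp only [hP, if_pos, List.length_cons, List.map_cons, List.reverse_cons,
        List.length_reverse, List.map_map]
      congr 2
      · apply List.map_congr_left
        intro p hp
        have := pvHits_lt_length P as p hp
        simp [Function.comp]; omega
      · simp [pvHits, hP, List.length_reverse]
    · simp only [hP, if_neg, Bool.false_eq_true, not_false_iff, List.length_cons,
        List.length_reverse, List.map_map]
      simp only [pvHits, hP, Bool.false_eq_true, if_neg, not_false_iff, List.map_nil,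
        List.append_nil]
      congr 1
      apply List.map_congr_left
      intro p hp
      have := pvHits_lt_length P as p hp
      simp [Function.comp]; omega

-- A's loop after the first prompt has been counted (noP = 1): runs to the next END-or-prompt line
theorem pvLoopA_one (kp : List String) (len : Nat) (r : List String) :
    ∀ (c : Nat) (idx : Option Nat),
    pvLoopA kp len r c 1 idx =
      match r.find? (fun l => pvIsEnd l || pvPromptHit kp l) with
      | none => some (idx, 1)
      | some l => if pvIsEnd l then none else some (idx, 2) := by
  induction r with
  | nil => intro c idx; simp [pvLoopA]
  | cons line rest ih =>
    intro c idx
    by_cases hE : pvIsEnd line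
    · simp [pvLoopA, hE, List.find?]
    · by_cases hP : pvPromptHit kp line
      · simp [pvLoopA, hE, hP, List.find?]
      · simp [pvLoopA, hE, hP, List.find?, ih]

theorem find?_eq_pvHits_head {α : Type} (P : α → Bool) (l : List α) :
    l.find? P = ((pvHits P l).head?).map (fun p => p.2) := by
  induction l with
  | nil => simp [pvHits]
  | cons a as ih =>
    by_cases hP : P a
    · simp [List.find?, hP, pvHits]
    · simp only [List.find?, hP, pvHits, Bool.false_eq_true, if_neg, not_false_iff, ih]
      cases pvHits P as <;> simp

-- A's loop from its initial state, characterised by the END-or-prompt hit table of r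
theorem pvLoopA_zero (kp : List String) (len : Nat) (r : List String) :
    ∀ (c : Nat),
    pvLoopA kp len r c 0 none =
      match pvHits (fun l => pvIsEnd l || pvPromptHit kp l) r with
      | [] => some (none, 0)
      | (j0, l0) :: rest =>
        if pvIsEnd l0 then none
        else match rest with
          | [] => some (some (len - 1 - (c + j0)), 1)
          | (_, l1) :: _ => if pvIsEnd l1 then none else some (some (len - 1 - (c + j0)), 2) := by
  induction r with
  | nil => intro c; simp [pvLoopA, pvHits]
  | cons line rest ih =>
    intro c
    by_cases hE : pvIsEnd line
    · simp [pvLoopA, hE, pvHits]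
    · by_cases hP : pvPromptHit kp line
      · simp only [pvLoopA, hE, if_neg, Bool.false_eq_true, not_false_iff, hP, if_pos]
        norm_num
        rw [pvLoopA_one kp len rest (c + 1) (some (len - 1 - c))]
        rw [find?_eq_pvHits_head]
        simp only [pvHits, hE, hP, Bool.or_true, if_pos]
        cases hrest : pvHits (fun l => pvIsEnd l || pvPromptHit kp l) rest with
        | nil => simp
        | cons p ps => simp
      · simp only [pvLoopA, hE, if_neg, Bool.false_eq_true, not_false_iff, hP, ih (c + 1)]
        simp only [pvHits, hE, hP, Bool.or_self, Bool.false_eq_true, if_neg, not_false_iff]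
        cases hrest : pvHits (fun l => pvIsEnd l || pvPromptHit kp l) rest with
        | nil => simp
        | cons p ps =>
          obtain ⟨j0, l0⟩ := p
          simp only [List.map_cons]
          have : c + 1 + j0 = c + (j0 + 1) := by omega
          rw [this]
          cases ps with
          | nil => simp
          | cons q qs => obtain ⟨j1, l1⟩ := q; simp

-- B's prompt-index comprehension is the hit table of the prompt predicate
theorem enum_filter_eq_pvHits {α : Type} (P : α → Bool) (m : List α) : ∀ (s : Int),
    ((PySem.List.enumerate m s).filter (fun il => P il.2)).map Prod.fst
      = (pvHits P m).map (fun p => s + (p.1 : Int)) := by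
  induction m with
  | nil => intro s; simp [pvHits]
  | cons a as ih =>
    intro s
    rw [PySem.List.enumerate_cons]
    by_cases hP : P a
    · simp only [List.filter_cons, hP, if_pos, List.map_cons, pvHits, ih (s + 1), List.map_map]
      congr 1
      · simp
      · apply List.map_congr_left; intro p _; simp [Function.comp]; omega
    · simp only [List.filter_cons, hP, Bool.false_eq_true, if_neg, not_false_iff, pvHits,
        ih (s + 1), List.map_map]
      apply List.map_congr_left; intro p _; simp [Function.comp]; omega

-- proof-side views of the two ports after the (identical) merge has produced m
def pvTailA (kp : List String) (m : List String) : List String × List String :=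
  match pvLoopA kp m.length m.reverse 0 0 none with
  | none => (m, [])
  | some (idx, noP) =>
    match idx with
    | some i => if 2 ≤ noP then (m.take i, m.drop i) else ([], m)
    | none => ([], m)

def pvTailB (kp : List String) (m : List String) : List String × List String :=
  let pidx : List Int := (pvHits (pvPromptHit kp) m).map (fun p => ((p.1 : Nat) : Int))
  let scanLow : Int := if 2 ≤ pidx.length then (PySem.List.pyGet? pidx (-2)).getD 0 else 0
  if (PySem.List.slice m (some scanLow) none).any (fun line => PySem.Str.isIn "END tty_sid" line) then
    (m, [])
  else if 2 ≤ pidx.length then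
    let split : Int := (PySem.List.pyGet? pidx (-1)).getD 0
    (PySem.List.slice m none (some split), PySem.List.slice m (some split) none)
  else ([], m)

-- the B branches once the prompt table is short (< 2 prompt lines): scan_low = 0
theorem pvTailB_small (kp : List String) (m : List String)
    (h : (pvHits (pvPromptHit kp) m).length < 2) :
    pvTailB kp m = if m.any pvIsEnd then (m, []) else ([], m) := by
  have h2 : ¬ 2 ≤ ((pvHits (pvPromptHit kp) m).map (fun p => ((p.1 : Nat) : Int))).length := by
    simpa using h
  simp only [pvTailB, h2, if_neg, if_false]
  simp [pvIsEnd, PySem.List.slice_none_none]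

-- the B branches with ≥ 2 prompt lines, expressed through the two top prompt indices
theorem pvTailB_big (kp : List String) (m : List String) (a b : Nat)
    (hg2 : PySem.List.pyGet? ((pvHits (pvPromptHit kp) m).map (fun p => ((p.1 : Nat) : Int))) (-2)
      = some ((b : Nat) : Int))
    (hg1 : PySem.List.pyGet? ((pvHits (pvPromptHit kp) m).map (fun p => ((p.1 : Nat) : Int))) (-1)
      = some ((a : Nat) : Int))
    (h2 : 2 ≤ (pvHits (pvPromptHit kp) m).length) :
    pvTailB kp m = if (m.drop b).any pvIsEnd then (m, [])
      else (m.take a, m.drop a) := by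
  have h2' : 2 ≤ ((pvHits (pvPromptHit kp) m).map (fun p => ((p.1 : Nat) : Int))).length := by
    simpa using h2
  simp only [pvTailB, h2', if_pos, hg2, hg1, Option.getD_some]
  rw [PySem.List.slice_from_natCast, PySem.List.slice_to_natCast, PySem.List.slice_from_natCast]
  simp [pvIsEnd]

-- END-window test on m.drop k, phrased through the END hit table of the reversed list
theorem any_drop_iff (m : List String) (k : Nat) :
    ((m.drop k).any pvIsEnd = true) ↔ ∃ p ∈ pvHits pvIsEnd m.reverse, p.1 < m.length - k := by
  have h1 : (m.drop k).any pvIsEnd = ((m.drop k).reverse).any pvIsEnd := by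
    rw [List.any_reverse]
  rw [h1, List.reverse_drop, any_take_iff_pvHits]

theorem any_whole_iff (m : List String) :
    (m.any pvIsEnd = true) ↔ ∃ p ∈ pvHits pvIsEnd m.reverse, p.1 < m.length := by
  have := any_drop_iff m 0
  simpa using this

-- the two leading reversed prompt indices determine B's prompt_idx[-2] / prompt_idx[-1]
theorem pyget_of_qr (kp : List String) (m : List String) (qa qb : Nat × String)
    (tl : List (Nat × String))
    (hqr : pvHits (pvPromptHit kp) m.reverse = qa :: qb :: tl) :
    PySem.List.pyGet? ((pvHits (pvPromptHit kp) m).map (fun p => ((p.1 : Nat) : Int))) (-2)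
        = some ((m.length - 1 - qb.1 : Nat) : Int)
    ∧ PySem.List.pyGet? ((pvHits (pvPromptHit kp) m).map (fun p => ((p.1 : Nat) : Int))) (-1)
        = some ((m.length - 1 - qa.1 : Nat) : Int)
    ∧ 2 ≤ (pvHits (pvPromptHit kp) m).length := by
  have hrev := pvHits_reverse (pvPromptHit kp) m
  have hmapT : (pvHits (pvPromptHit kp) m).map (fun p => (m.length - 1 - p.1, p.2))
      = (qa :: qb :: tl).reverse := by
    have h := congrArg List.reverse (hrev.symm.trans hqr)
    simpa using h
  have hn : (pvHits (pvPromptHit kp) m).length = tl.length + 2 := by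
    have := congrArg List.length hmapT
    simpa using this
  have hplen : ((pvHits (pvPromptHit kp) m).map (fun p => ((p.1 : Nat) : Int))).length
      = tl.length + 2 := by simpa using hn
  refine ⟨?_, ?_, by omega⟩
  · -- prompt_idx[-2]
    rw [PySem.List.pyGet?_neg_ofNat _ 2 (by norm_num) (by omega)]
    rw [hplen]
    have h1 : ((pvHits (pvPromptHit kp) m).map
        (fun p => (m.length - 1 - p.1, p.2)))[tl.length]? = some qb := by
      rw [hmapT, List.getElem?_reverse (by simp)]
      simp
    rw [List.getElem?_map] at h1
    obtain ⟨x, hx, hTx⟩ := Option.map_eq_some_iff.mp h1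
    have hxm : x ∈ pvHits (pvPromptHit kp) m := List.mem_of_getElem? hx
    have hxlt : x.1 < m.length := pvHits_lt_length _ _ _ hxm
    have hfst : m.length - 1 - x.1 = qb.1 := congrArg Prod.fst hTx
    have : (tl.length + 2 - 2) = tl.length := by omega
    rw [this, List.getElem?_map, hx]
    simp only [Option.map_some]
    congr 1
    omega
  · -- prompt_idx[-1]
    rw [PySem.List.pyGet?_neg_one]
    have h1 : ((pvHits (pvPromptHit kp) m).map
        (fun p => (m.length - 1 - p.1, p.2))).getLast? = some qa := by
      rw [hmapT]
      rw [← List.head?_reverse]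
      simp
    rw [List.getLast?_map] at h1
    obtain ⟨x, hx, hTx⟩ := Option.map_eq_some_iff.mp h1
    have hxm : x ∈ pvHits (pvPromptHit kp) m := List.mem_of_getLast? hx
    have hxlt : x.1 < m.length := pvHits_lt_length _ _ _ hxm
    have hfst : m.length - 1 - x.1 = qa.1 := congrArg Prod.fst hTx
    rw [List.getLast?_map, hx]
    simp only [Option.map_some]
    congr 1
    omega

theorem pvTails_eq (kp : List String) (m : List String) : pvTailA kp m = pvTailB kp m := by
  have hsubq := pvHits_sublist (pvPromptHit kp)
    (fun l => pvIsEnd l || pvPromptHit kp l) m.reverse (by intro x hx; simp [hx])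
  have hsube := pvHits_sublist pvIsEnd
    (fun l => pvIsEnd l || pvPromptHit kp l) m.reverse (by intro x hx; simp [hx])
  have hpair_s := pvHits_pairwise (fun l => pvIsEnd l || pvPromptHit kp l) m.reverse
  have hpair_q := pvHits_pairwise (pvPromptHit kp) m.reverse
  have hlen_qr : (pvHits (pvPromptHit kp) m.reverse).length
      = (pvHits (pvPromptHit kp) m).length := by
    rw [pvHits_reverse]; simp
  simp only [pvTailA]
  rw [pvLoopA_zero]
  cases hs : pvHits (fun l => pvIsEnd l || pvPromptHit kp l) m.reverse with
  | nil =>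
    have hq : pvHits (pvPromptHit kp) m.reverse = [] := by
      rw [hs] at hsubq; exact List.sublist_nil.mp hsubq
    have he : pvHits pvIsEnd m.reverse = [] := by
      rw [hs] at hsube; exact List.sublist_nil.mp hsube
    have hsmall : (pvHits (pvPromptHit kp) m).length < 2 := by
      rw [← hlen_qr, hq]; simp
    rw [pvTailB_small kp m hsmall]
    have hany : ¬ m.any pvIsEnd = true := by
      intro h
      obtain ⟨p, hp, -⟩ := (any_whole_iff m).mp h
      rw [he] at hp; simp at hp
    simp [hany]
  | cons p0 rest =>
    obtain ⟨j0, l0⟩ := p0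
    have hmem0 : (j0, l0) ∈ pvHits (fun l => pvIsEnd l || pvPromptHit kp l) m.reverse := by
      rw [hs]; exact List.mem_cons_self
    have h0 := (mem_pvHits_iff _ _ _ _).mp hmem0
    have hj0 : j0 < m.length := by
      have := pvHits_lt_length _ _ _ hmem0; simpa using this
    rw [hs] at hpair_s
    have hrest_lt : ∀ q ∈ rest, j0 < q.1 := by
      intro q hq; exact (List.pairwise_cons.mp hpair_s).1 q hq
    by_cases hE0 : pvIsEnd l0
    · -- A hits the END line first: both sides return (m, [])
      have hmemE : (j0, l0) ∈ pvHits pvIsEnd m.reverse :=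
        (mem_pvHits_iff _ _ _ _).mpr ⟨h0.1, hE0⟩
      by_cases h2 : 2 ≤ (pvHits (pvPromptHit kp) m).length
      · obtain ⟨qa, qb, tl, hqr⟩ :
            ∃ qa qb tl, pvHits (pvPromptHit kp) m.reverse = qa :: qb :: tl := by
          rcases hq : pvHits (pvPromptHit kp) m.reverse with _ | ⟨qa, _ | ⟨qb, tl⟩⟩ <;>
            first
              | exact ⟨_, _, _, rfl⟩
              | (exfalso; rw [← hlen_qr, hq] at h2; simp at h2)
        obtain ⟨hg2, hg1, -⟩ := pyget_of_qr kp m qa qb tl hqr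
        rw [pvTailB_big kp m _ _ hg2 hg1 h2]
        have hqb : qb.1 < m.length := by
          have : qb ∈ pvHits (pvPromptHit kp) m.reverse := by rw [hqr]; simp
          have := pvHits_lt_length _ _ _ this; simpa using this
        have hqbs : qb ∈ ((j0, l0) :: rest) := by
          rw [← hs]; exact hsubq.subset (by rw [hqr]; simp)
        have hj0qb : j0 ≤ qb.1 := by
          rcases List.mem_cons.mp hqbs with h | h
          · rw [h]
          · exact le_of_lt (hrest_lt qb h)
        have hwin : (m.drop (m.length - 1 - qb.1)).any pvIsEnd = true := by
          rw [any_drop_iff]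
          exact ⟨(j0, l0), hmemE, by omega⟩
        simp [hE0, hwin]
      · rw [pvTailB_small kp m (by omega)]
        have : m.any pvIsEnd = true := (any_whole_iff m).mpr ⟨(j0, l0), hmemE, hj0⟩
        simp [hE0, this]
    · -- first hit is a prompt line
      have hP0 : pvPromptHit kp l0 = true := by
        have := h0.2; simp [hE0] at this; exact this
      have hmemq0 : (j0, l0) ∈ pvHits (pvPromptHit kp) m.reverse :=
        (mem_pvHits_iff _ _ _ _).mpr ⟨h0.1, hP0⟩
      rcases hqr : pvHits (pvPromptHit kp) m.reverse with _ | ⟨qa, tl1⟩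
      · rw [hqr] at hmemq0; simp at hmemq0
      · have hqa_lt : ∀ x ∈ tl1, qa.1 < x.1 := by
          rw [hqr] at hpair_q
          exact (List.pairwise_cons.mp hpair_q).1
        have hqa : qa = (j0, l0) := by
          have hqa_s : qa ∈ ((j0, l0) :: rest) := by
            rw [← hs]; exact hsubq.subset (by rw [hqr]; simp)
          rw [hqr] at hmemq0
          rcases List.mem_cons.mp hmemq0 with h | h
          · exact h.symm
          · exfalso
            have h1 : qa.1 < j0 := by simpa using hqa_lt _ h
            rcases List.mem_cons.mp hqa_s with h' | h'
            · rw [h'] at h1; omega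
            · have := hrest_lt qa h'; omega
        cases rest with
        | nil =>
          -- single END-or-prompt line, and it is a prompt: fewer than 2 prompts, no END
          have hsmall : (pvHits (pvPromptHit kp) m).length < 2 := by
            rw [← hlen_qr, hqr]
            have : tl1 = [] := by
              have hsub := hsubq
              rw [hqr, hs] at hsub
              have hl := hsub.length_le
              simp only [List.length_cons, List.length_nil] at hl
              exact List.eq_nil_of_length_eq_zero (by omega)
            rw [this]; simp
          rw [pvTailB_small kp m hsmall]
          have hany : ¬ m.any pvIsEnd = true := by
            intro h
            obtain ⟨p, hp, -⟩ := (any_whole_iff m).mp h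
            have hpE : pvIsEnd p.2 = true := ((mem_pvHits_iff _ _ _ _).mp (by exact hp)).2
            have hps : p ∈ [(j0, l0)] := by rw [← hs]; exact hsube.subset hp
            simp at hps
            rw [hps] at hpE; simp [hpE] at hE0
          simp [hE0, hany]
        | cons p1 rest' =>
          obtain ⟨j1, l1⟩ := p1
          have hmem1 : (j1, l1) ∈ pvHits (fun l => pvIsEnd l || pvPromptHit kp l) m.reverse := by
            rw [hs]; simp
          have h1 := (mem_pvHits_iff _ _ _ _).mp hmem1
          have hj1 : j1 < m.length := by
            have := pvHits_lt_length _ _ _ hmem1; simpa using this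
          have hj01 : j0 < j1 := by simpa using hrest_lt (j1, l1) (by simp)
          have hrest'_lt : ∀ q ∈ rest', j1 < q.1 := by
            intro q hq
            have := (List.pairwise_cons.mp (List.pairwise_cons.mp hpair_s).2).1 q hq
            simpa using this
          by_cases hE1 : pvIsEnd l1
          · -- second scanned hit is an END line: both sides return (m, [])
            have hmemE : (j1, l1) ∈ pvHits pvIsEnd m.reverse :=
              (mem_pvHits_iff _ _ _ _).mpr ⟨h1.1, hE1⟩
            by_cases h2 : 2 ≤ (pvHits (pvPromptHit kp) m).length
            · obtain ⟨qb, tl, htl1⟩ : ∃ qb tl, tl1 = qb :: tl := by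
                cases htl : tl1 with
                | nil => exfalso; rw [← hlen_qr, hqr, htl] at h2; simp at h2
                | cons qb tl => exact ⟨_, _, rfl⟩
              rw [htl1] at hqr
              obtain ⟨hg2, hg1, -⟩ := pyget_of_qr kp m qa qb tl hqr
              rw [pvTailB_big kp m _ _ hg2 hg1 h2]
              have hqb : qb.1 < m.length := by
                have : qb ∈ pvHits (pvPromptHit kp) m.reverse := by rw [hqr]; simp
                have := pvHits_lt_length _ _ _ this; simpa using this
              have hqbs : qb ∈ ((j0, l0) :: (j1, l1) :: rest') := by
                rw [← hs]; exact hsubq.subset (by rw [hqr]; simp)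
              have hj1qb : j1 ≤ qb.1 := by
                have hqa1 : qa.1 < qb.1 := by
                  simpa using hqa_lt qb (by rw [htl1]; simp)
                rcases List.mem_cons.mp hqbs with h | h
                · exfalso; rw [hqa] at hqa1; rw [h] at hqa1; omega
                · rcases List.mem_cons.mp h with h' | h'
                  · rw [h']
                  · exact le_of_lt (hrest'_lt qb h')
              have hwin : (m.drop (m.length - 1 - qb.1)).any pvIsEnd = true := by
                rw [any_drop_iff]
                exact ⟨(j1, l1), hmemE, by omega⟩
              simp [hE0, hE1, hwin]
            · rw [pvTailB_small kp m (by omega)]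
              have : m.any pvIsEnd = true := (any_whole_iff m).mpr ⟨(j1, l1), hmemE, hj1⟩
              simp [hE0, hE1, this]
          · -- two prompt lines, no END in the scanned window: both sides split at the last prompt
            have hP1 : pvPromptHit kp l1 = true := by
              have := h1.2; simp [hE1] at this; exact this
            have hmemq1 : (j1, l1) ∈ pvHits (pvPromptHit kp) m.reverse :=
              (mem_pvHits_iff _ _ _ _).mpr ⟨h1.1, hP1⟩
            obtain ⟨qb, tl, htl1⟩ : ∃ qb tl, tl1 = qb :: tl := by
              cases htl : tl1 with
              | nil =>
                exfalso
                rw [hqr, htl] at hmemq1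
                simp [hqa] at hmemq1
                have := hmemq1.1; omega
              | cons qb tl => exact ⟨_, _, rfl⟩
            rw [htl1] at hqr hqa_lt
            have hqb : qb = (j1, l1) := by
              have hqbs : qb ∈ ((j0, l0) :: (j1, l1) :: rest') := by
                rw [← hs]; exact hsubq.subset (by rw [hqr]; simp)
              have hqa1 : qa.1 < qb.1 := by simpa using hqa_lt qb (by simp)
              rw [hqr] at hmemq1
              rcases List.mem_cons.mp hmemq1 with h | h
              · exfalso; have heq := h.trans hqa; simp at heq; omega
              · rcases List.mem_cons.mp h with h' | h'
                · exact h'.symm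
                · exfalso
                  have hql : qb.1 < j1 := by
                    rw [hqr] at hpair_q
                    have := (List.pairwise_cons.mp (List.pairwise_cons.mp hpair_q).2).1 _ h'
                    simpa using this
                  rcases List.mem_cons.mp hqbs with h'' | h''
                  · rw [hqa] at hqa1; rw [h''] at hql hqa1; omega
                  · rcases List.mem_cons.mp h'' with h3 | h3
                    · rw [h3] at hql; omega
                    · have := hrest'_lt qb h3; omega
            obtain ⟨hg2, hg1, h2⟩ := pyget_of_qr kp m qa qb tl hqr
            rw [pvTailB_big kp m _ _ hg2 hg1 h2]
            have hwin : ¬ (m.drop (m.length - 1 - qb.1)).any pvIsEnd = true := by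
              intro h
              obtain ⟨p, hp, hlt⟩ := (any_drop_iff _ _).mp h
              have hpE : pvIsEnd p.2 = true := ((mem_pvHits_iff _ _ _ _).mp (by exact hp)).2
              have hqb1 : qb.1 < m.length := by
                have : qb ∈ pvHits (pvPromptHit kp) m.reverse := by rw [hqr]; simp
                have := pvHits_lt_length _ _ _ this; simpa using this
              have hple : p.1 ≤ qb.1 := by omega
              have hps : p ∈ ((j0, l0) :: (j1, l1) :: rest') := by
                rw [← hs]; exact hsube.subset hp
              rcases List.mem_cons.mp hps with h' | h'
              · rw [h'] at hpE; simp [hpE] at hE0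
              · rcases List.mem_cons.mp h' with h'' | h''
                · rw [h''] at hpE; simp [hpE] at hE1
                · have := hrest'_lt p h''; rw [hqb] at hple; simp at hple; omega
            have hwin' : ¬ (m.drop (m.length - 1 - j1)).any pvIsEnd = true := by
              simpa [hqb] using hwin
            rw [hqa, hqb]
            simp [hE0, hE1, hwin']

-- ===== VERDICT (by name: the statement is the Claim_ definition above) =====
theorem get_ttylog_lines_to_decode_spec : Claim_equal_get_ttylog_lines_to_decode := by
  intro rn ff kp root _
  unfold Spec_get_ttylog_lines_to_decode
  by_cases hff : ff = []
  · subst hff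
    simp [get_ttylog_lines_to_decode, get_ttylog_lines_to_decode_alt]
  · have hlen : ¬ ff.length = 0 := by simpa using hff
    have hie : ¬ ff.isEmpty = true := by simpa [List.isEmpty_iff] using hff
    have hmerge :
        (if rn.length > 0 then
            rn.dropLast ++ [rn.getLastD "" ++ ff.headD ""] ++
              (if ff.length > 1 then ff.tail else [])
          else rn ++ ff)
        = (if ¬ rn.isEmpty then
            rn.dropLast ++ [rn.getLastD "" ++ ff.headD ""] ++ ff.tail
          else rn ++ ff) := by
      by_cases hrn : rn = []
      · subst hrn; simp
      · have h1 : rn.length > 0 := List.length_pos_iff.mpr hrn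
        have h1' : ¬ rn.isEmpty = true := by simpa [List.isEmpty_iff] using hrn
        by_cases h2 : ff.length > 1
        · simp [h1, h1', h2]
        · have ht : ff.tail = [] := by
            have : ff.tail.length = 0 := by simp; omega
            exact List.eq_nil_of_length_eq_zero this
          simp [h1, h1', h2, ht]
    set m : List String := (if ¬ rn.isEmpty then
        rn.dropLast ++ [rn.getLastD "" ++ ff.headD ""] ++ ff.tail
      else rn ++ ff) with hm
    have henum : ∀ (ml : List String) (st : Int), PySem.List.enumerate (ml.map PySem.Str.lower) st
        = (PySem.List.enumerate ml st).map (fun p => (p.1, PySem.Str.lower p.2)) := by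
      intro ml
      induction ml with
      | nil => intro st; simp
      | cons x xs ih => intro st; simp [PySem.List.enumerate_cons, ih]
    have hpidx : ((PySem.List.enumerate (m.map PySem.Str.lower)).filter
          (fun il => (kp.map PySem.Str.lower).any
            (fun p => PySem.Str.isIn p il.2))).map Prod.fst
        = (pvHits (pvPromptHit kp) m).map (fun p => ((p.1 : Nat) : Int)) := by
      rw [henum, List.filter_map, List.map_map]
      have hpred : (fun il : Int × String => (kp.map PySem.Str.lower).any
            (fun p => PySem.Str.isIn p (PySem.Str.lower il.2)))
          = (fun il : Int × String => pvPromptHit kp il.2) := by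
        funext il; simp [List.any_map, pvPromptHit, Function.comp_def, pysem]
      have hcomp : ((fun il : Int × String => (kp.map PySem.Str.lower).any
            (fun p => PySem.Str.isIn p il.2)) ∘ (fun p : Int × String => (p.1, PySem.Str.lower p.2)))
          = (fun il : Int × String => pvPromptHit kp il.2) := by
        funext il
        have := congrFun hpred il
        simpa [Function.comp] using this
      rw [hcomp]
      have hfst : (Prod.fst ∘ (fun p : Int × String => (p.1, PySem.Str.lower p.2)))
          = (Prod.fst : Int × String → Int) := by funext p; rfl
      rw [hfst, enum_filter_eq_pvHits]
      simp
    have hA : get_ttylog_lines_to_decode rn ff kp root = pvTailA kp m := by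
      simp only [get_ttylog_lines_to_decode, hlen, if_neg, pvTailA]
      rw [hmerge]
      simp
    have hB : get_ttylog_lines_to_decode_alt rn ff kp root = pvTailB kp m := by
      simp only [get_ttylog_lines_to_decode_alt, hie, if_neg, pvTailB]
      rw [hpidx, ← hm]
      simp
    rw [hA, hB, pvTails_eq]
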